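-- pv_equiv track=rewrite | github.com/Slava-N/Netology_tasks | Encoding_via_PyCharm/task.py | count_words_function
-- ===== SOURCE A (Python) =====
-- def count_words_function(all_words_2):
--     count_words_1 = {}
--     for every_word in all_words_2:
--         if len(every_word) >= 6:
--             try:
--                 count_words_1[every_word] += 1
--             except:
--                 count_words_1[every_word] = 1
--     return count_words_1
-- ===== SOURCE B (Python) =====
-- def count_words_function(all_words_2):
--     # Enumerate distinct words once (first-occurrence order, like dict insertion),
--     # and recompute each qualifying word's count by a separate scan of the input.
--     return {w: all_words_2.count(w)
--             for w in dict.fromkeys(all_words_2)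
--             if len(w) >= 6}
-- ===== Notes on version B (the rewrite author's own statement) =====
-- stated objective: alternative
-- what changed: Replaces the single accumulating dict pass with a two-phase strategy: dedup the input first (dict.fromkeys), then for each distinct long word recompute its count by a full list.count scan.
import Mathlib
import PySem

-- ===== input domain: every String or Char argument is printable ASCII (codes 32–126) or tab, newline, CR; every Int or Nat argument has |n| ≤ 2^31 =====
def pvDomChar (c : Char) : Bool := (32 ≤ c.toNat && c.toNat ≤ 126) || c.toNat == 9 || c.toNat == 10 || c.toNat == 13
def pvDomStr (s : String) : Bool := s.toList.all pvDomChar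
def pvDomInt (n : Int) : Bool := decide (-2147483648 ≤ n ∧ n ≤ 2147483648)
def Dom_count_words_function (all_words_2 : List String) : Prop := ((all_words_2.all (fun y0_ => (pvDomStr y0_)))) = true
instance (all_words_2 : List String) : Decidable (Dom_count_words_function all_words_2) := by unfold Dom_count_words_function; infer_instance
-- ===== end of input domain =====

-- B enumerates the distinct words first and recomputes each count by a separate scan,
-- instead of A's single accumulating dict pass; same return value (alternative, not faster).

-- ===== PORT A =====
-- single pass: for every long word, try d[w] += 1 / except d[w] = 1
def count_words_function (all_words_2 : List String) : List (String × Int) :=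
  (all_words_2.foldl
    (fun d w =>
      if 6 ≤ PySem.Str.len w then
        match d.get? w with
        | some v => d.insert w (v + 1)   -- try: count_words_1[every_word] += 1
        | none   => d.insert w 1         -- except: count_words_1[every_word] = 1
      else d)
    (PySem.Dict.empty : PySem.Dict String Int)).items

-- ===== PORT B =====
def count_words_function_alt (all_words_2 : List String) : List (String × Int) :=
  ((PySem.List.dedup all_words_2).filter (fun w => 6 ≤ PySem.Str.len w)).map
    (fun w => (w, (all_words_2.count w : Int)))

-- ===== PRECONDITION & SPEC =====
def Spec_count_words_function (all_words_2 : List String) (out : List (String × Int)) : Prop := out = count_words_function_alt all_words_2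
instance (all_words_2 : List String) (out : List (String × Int)) : Decidable (Spec_count_words_function all_words_2 out) := by unfold Spec_count_words_function; infer_instance

-- ===== CLAIM (what is proved, stated in full; the proofs are below) =====
def Claim_equal_count_words_function : Prop := ∀ (all_words_2 : List String), Dom_count_words_function all_words_2 → Spec_count_words_function all_words_2 (count_words_function all_words_2)

-- ===== LEMMAS AND PROOFS =====

-- A's try/except step is the counter step insert w (getD w 0 + 1)
theorem pv_step_eq (d : PySem.Dict String Int) (w : String) :
    (match d.get? w with
     | some v => d.insert w (v + 1)
     | none   => d.insert w 1) = d.insert w (d.getD w 0 + 1) := by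
  rw [PySem.Dict.getD_eq_get?_getD]
  cases d.get? w <;> simp

-- A's guarded fold over the whole list is the counter fold over the filtered list
theorem pv_fold_filter (ws : List String) (d : PySem.Dict String Int) :
    ws.foldl
      (fun d w =>
        if 6 ≤ PySem.Str.len w then
          (match d.get? w with
           | some v => d.insert w (v + 1)
           | none   => d.insert w 1)
        else d) d
    = (ws.filter (fun w => 6 ≤ PySem.Str.len w)).foldl
        (fun d w => d.insert w (d.getD w 0 + 1)) d := by
  induction ws generalizing d with
  | nil => rfl
  | cons x xs ih =>
    simp only [List.foldl_cons, List.filter_cons]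
    by_cases h : 6 ≤ PySem.Str.len x
    · rw [if_pos h, pv_step_eq, ih, if_pos (by simpa using h), List.foldl_cons]
    · rw [if_neg h, ih, if_neg (by simpa using h)]

-- adding one element commutes with filter
theorem pv_filter_add (p : String → Bool) (s : PySem.Set String) (x : String) :
    (PySem.Set.add s x).filter p
      = if p x then PySem.Set.add (List.filter p s) x else List.filter p s := by
  unfold PySem.Set.add PySem.Set.contains
  by_cases hx : p x
  · by_cases hm : x ∈ s
    · simp [hm, hx]
    · simp [hm, hx]
  · by_cases hm : x ∈ s
    · simp [hm]
    · simp [hm, hx]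

-- the Set-building fold commutes with filter
theorem pv_foldl_add_filter (p : String → Bool) (ws : List String) (s : PySem.Set String) :
    (ws.foldl PySem.Set.add s).filter p
      = (ws.filter p).foldl PySem.Set.add (s.filter p) := by
  induction ws generalizing s with
  | nil => rfl
  | cons x xs ih =>
    simp only [List.foldl_cons, List.filter_cons]
    rw [ih, pv_filter_add]
    by_cases hx : p x
    · rw [if_pos hx, if_pos hx, List.foldl_cons]
    · rw [if_neg hx, if_neg hx]

-- dedup of the filtered list is the filter of the dedup
theorem pv_dedup_filter (p : String → Bool) (ws : List String) :
    PySem.List.dedup (ws.filter p) = (PySem.List.dedup ws).filter p := by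
  unfold PySem.List.dedup PySem.Set.ofList
  rw [pv_foldl_add_filter]
  rfl

-- ===== VERDICT (by name: the statement is the Claim_ definition above) =====
theorem count_words_function_spec : Claim_equal_count_words_function := by
  intro ws _
  show _ = _
  unfold count_words_function count_words_function_alt
  rw [pv_fold_filter, PySem.Dict.foldl_insert_getD_add_one_eq_counter,
      PySem.Dict.items_counter]
  rw [← PySem.List.dedup_eq_ofList, pv_dedup_filter]
  apply List.map_congr_left
  intro w hw
  rw [List.count_filter (p := fun w => decide (6 ≤ PySem.Str.len w)) (l := ws)
        (List.mem_filter.mp hw).2]
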